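-- pv_equiv track=rewrite | github.com/yashwanthguguloth24/Algorithms | Sorting/valid_pair_sum.py | findNumOfPair
-- ===== SOURCE A (Python) =====
-- from bisect import bisect_left as lower_bound
--
-- def findNumOfPair(array, n):
--     array = sorted(array)
--     count = 0
--     for i in range(n):
--         if array[i] <= 0:
--             continue
--         j = lower_bound(array,-array[i]+1)
--         count += i-j
--
--     return count
-- ===== SOURCE B (Python) =====
-- def findNumOfPair(array, n):
--     a = sorted(array)
--     left, right = 0, n - 1
--     count = 0
--     while left < right:
--         if a[left] + a[right] > 0:
--             count += right - left
--             right -= 1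
--         else:
--             left += 1
--     return count
-- ===== Notes on version B (the rewrite author's own statement) =====
-- stated objective: alternative
-- what changed: Replaces the per-element binary-search (bisect_left) counting loop with a single two-pointer scan over the sorted array that adds right-left whole blocks of pairs at a time.
import Mathlib
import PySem

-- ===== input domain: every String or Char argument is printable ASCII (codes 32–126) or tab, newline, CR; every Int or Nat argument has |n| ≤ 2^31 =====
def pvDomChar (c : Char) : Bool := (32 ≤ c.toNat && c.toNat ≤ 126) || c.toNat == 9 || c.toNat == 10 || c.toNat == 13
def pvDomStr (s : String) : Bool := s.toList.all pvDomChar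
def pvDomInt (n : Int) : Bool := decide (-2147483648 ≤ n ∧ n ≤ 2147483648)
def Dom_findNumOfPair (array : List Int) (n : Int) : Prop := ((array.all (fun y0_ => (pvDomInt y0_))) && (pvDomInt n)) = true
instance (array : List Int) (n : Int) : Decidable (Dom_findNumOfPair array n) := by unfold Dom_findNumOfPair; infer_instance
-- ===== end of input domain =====

-- B replaces A's per-element bisect_left counting with a two-pointer scan over the sorted array; equivalence proved for n ≤ len(array) (A raises IndexError beyond).


-- ===== PORT A =====
-- for i in range(n): if array[i] <= 0: continue; j = bisect_left(array, -array[i]+1); count += i - j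
def findNumOfPair (array : List Int) (n : Int) : Int :=
  let a := PySem.List.sorted array (fun x => x)
  (PySem.List.pyRange 0 n 1).foldl
    (fun count i =>
      let ai := PySem.List.pyGetD a i 0   -- array[i]; IndexError (n > len) excluded by Pre_
      if ai ≤ 0 then count
      else count + (i - (PySem.List.bisectLeft a (-ai + 1) : Int)))
    0

-- ===== PORT B =====
-- while left < right: if a[left] + a[right] > 0: count += right - left; right -= 1 else: left += 1
def tpLoop (a : List Int) (left right count : Int) : Int :=
  if left < right then
    if 0 < PySem.List.pyGetD a left 0 + PySem.List.pyGetD a right 0 then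
      tpLoop a left (right - 1) (count + (right - left))
    else
      tpLoop a (left + 1) right count
  else count
termination_by (right - left).toNat
decreasing_by all_goals omega

def findNumOfPair_alt (array : List Int) (n : Int) : Int :=
  tpLoop (PySem.List.sorted array (fun x => x)) 0 (n - 1) 0

-- ===== PRECONDITION & SPEC =====
-- Pre_ excludes n > len(array), on which A raises IndexError at array[i].
def Pre_findNumOfPair (array : List Int) (n : Int) : Prop := n ≤ (array.length : Int)
instance (array : List Int) (n : Int) : Decidable (Pre_findNumOfPair array n) := by unfold Pre_findNumOfPair; infer_instance
def pvWitness_findNumOfPair : List Int × Int := ([3, -1, 2, -2], 4)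

def Spec_findNumOfPair (array : List Int) (n : Int) (out : Int) : Prop := out = findNumOfPair_alt array n
instance (array : List Int) (n : Int) (out : Int) : Decidable (Spec_findNumOfPair array n out) := by unfold Spec_findNumOfPair; infer_instance

-- ===== CLAIM (what is proved, stated in full; the proofs are below) =====
def Claim_equal_findNumOfPair : Prop := ∀ (array : List Int) (n : Int), Dom_findNumOfPair array n → Pre_findNumOfPair array n → Spec_findNumOfPair array n (findNumOfPair array n)
-- ===== LEMMAS AND PROOFS =====

-- number of p with l ≤ p < q and a[p] + a[q] > 0
def pairsAt (a : List Int) (l q : Nat) : Nat :=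
  ((Finset.Ico l q).filter (fun p => 0 < a.getD p 0 + a.getD q 0)).card

-- number of pairs l ≤ p < q ≤ r with a[p] + a[q] > 0
def winPairs (a : List Int) (l r : Nat) : Nat :=
  ∑ q ∈ Finset.Ioc l r, pairsAt a l q

lemma sorted_getD_mono (a : List Int) (ha : a.Pairwise (· ≤ ·)) {p q : Nat}
    (hpq : p ≤ q) (hq : q < a.length) : a.getD p 0 ≤ a.getD q 0 := by
  have hp : p < a.length := lt_of_le_of_lt hpq hq
  rw [List.getD_eq_getElem a 0 hp, List.getD_eq_getElem a 0 hq]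
  rcases eq_or_lt_of_le hpq with h | h
  · subst h; rfl
  · exact List.pairwise_iff_getElem.mp ha p q hp hq h

lemma winPairs_right (a : List Int) (l r : Nat) (hlr : l < r) :
    winPairs a l r = winPairs a l (r - 1) + pairsAt a l r := by
  have h : r - 1 + 1 = r := by omega
  calc winPairs a l r = ∑ q ∈ Finset.Ioc l ((r-1)+1), pairsAt a l q := by rw [h]; rfl
    _ = (∑ q ∈ Finset.Ioc l (r-1), pairsAt a l q) + pairsAt a l ((r-1)+1) :=
        Finset.sum_Ioc_succ_top (by omega) _
    _ = winPairs a l (r-1) + pairsAt a l r := by rw [h]; rfl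

lemma pairsAt_full (a : List Int) (ha : a.Pairwise (· ≤ ·)) (l r : Nat)
    (hr : r < a.length) (hpos : 0 < a.getD l 0 + a.getD r 0) : pairsAt a l r = r - l := by
  unfold pairsAt
  rw [Finset.filter_true_of_mem, Nat.card_Ico]
  intro p hp
  rw [Finset.mem_Ico] at hp
  have := sorted_getD_mono a ha hp.1 (lt_trans hp.2 hr)
  omega

lemma winPairs_left (a : List Int) (ha : a.Pairwise (· ≤ ·)) (l r : Nat) (hlr : l < r)
    (hr : r < a.length) (hneg : ¬ 0 < a.getD l 0 + a.getD r 0) :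
    winPairs a l r = winPairs a (l + 1) r := by
  have key : ∀ q : Nat, q ≤ r → a.getD l 0 + a.getD q 0 ≤ 0 := by
    intro q hq
    have := sorted_getD_mono a ha hq hr
    omega
  unfold winPairs
  have hins : Finset.Ioc l r = insert (l + 1) (Finset.Ioc (l + 1) r) := by
    ext x; simp only [Finset.mem_Ioc, Finset.mem_insert]; omega
  rw [hins, Finset.sum_insert (by simp)]
  have h1 : pairsAt a l (l + 1) = 0 := by
    unfold pairsAt
    have : Finset.Ico l (l + 1) = {l} := by ext x; simp only [Finset.mem_Ico, Finset.mem_singleton]; omega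
    rw [this, Finset.filter_singleton, if_neg (by have := key (l + 1) hlr; omega)]
    rfl
  rw [h1, Nat.zero_add]
  refine Finset.sum_congr rfl ?_
  intro q hq
  rw [Finset.mem_Ioc] at hq
  unfold pairsAt
  rw [← Finset.insert_Ico_add_one_left_eq_Ico (show l < q by omega), Finset.filter_insert,
      if_neg (by have := key q hq.2; omega)]

lemma tpLoop_eq (a : List Int) (ha : a.Pairwise (· ≤ ·)) :
    ∀ (k l r : Nat), r - l = k → r < a.length → ∀ c : Int,
      tpLoop a (l : Int) (r : Int) c = c + (winPairs a l r : Int) := by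
  intro k
  induction k using Nat.strong_induction_on with
  | _ k IH =>
    intro l r hk hr c
    rw [tpLoop]
    by_cases hlr : (l : Int) < (r : Int)
    · have hlr' : l < r := by exact_mod_cast hlr
      rw [if_pos hlr]
      simp only [PySem.List.pyGetD_natCast]
      by_cases hpos : 0 < a.getD l 0 + a.getD r 0
      · rw [if_pos hpos, show ((r:Int) - 1) = ((r - 1 : Nat) : Int) by omega,
           IH (r - 1 - l) (by omega) l (r - 1) rfl (by omega)]
        have hw := winPairs_right a l r hlr'
        have hp := pairsAt_full a ha l r hr hpos
        omega
      · rw [if_neg hpos, show ((l:Int) + 1) = ((l + 1 : Nat) : Int) by omega,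
           IH (r - (l + 1)) (by omega) (l + 1) r rfl hr]
        rw [winPairs_left a ha l r hlr' hr hpos]
    · rw [if_neg hlr]
      have hrl : r ≤ l := by omega
      have : winPairs a l r = 0 := by
        unfold winPairs
        rw [Finset.Ioc_eq_empty (by omega), Finset.sum_empty]
      omega

lemma a_step (a : List Int) (ha : a.Pairwise (· ≤ ·)) (i : Nat) (hi : i < a.length) :
    (if a.getD i 0 ≤ 0 then (0:Int)
     else (i : Int) - (PySem.List.bisectLeft a (-(a.getD i 0) + 1) : Int)) = (pairsAt a 0 i : Int) := by
  by_cases h0 : a.getD i 0 ≤ 0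
  · rw [if_pos h0]
    have : pairsAt a 0 i = 0 := by
      unfold pairsAt
      rw [Finset.card_eq_zero, Finset.filter_eq_empty_iff]
      intro p hp
      rw [Finset.mem_Ico] at hp
      have := sorted_getD_mono a ha (le_of_lt hp.2) hi
      omega
    rw [this]; rfl
  · rw [if_neg h0]
    obtain ⟨hjle, hlt, hge⟩ := PySem.List.bisectLeft_spec a (-(a.getD i 0) + 1) ha
    have hgi : a.getD i 0 = a[i] := List.getD_eq_getElem a 0 hi
    have hji : PySem.List.bisectLeft a (-(a.getD i 0) + 1) ≤ i := by
      by_contra hc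
      have := hlt i hi (by omega)
      omega
    have hfilter : (Finset.Ico 0 i).filter (fun p => 0 < a.getD p 0 + a.getD i 0)
        = Finset.Ico (PySem.List.bisectLeft a (-(a.getD i 0) + 1)) i := by
      ext p
      simp only [Finset.mem_filter, Finset.mem_Ico]
      constructor
      · rintro ⟨⟨-, hpi⟩, hpos⟩
        refine ⟨?_, hpi⟩
        by_contra hc
        have hplen : p < a.length := lt_trans hpi hi
        have := hlt p hplen (by omega)
        rw [← List.getD_eq_getElem a 0 hplen] at this
        omega
      · rintro ⟨hjp, hpi⟩
        have hplen : p < a.length := lt_trans hpi hi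
        have := hge p hplen hjp
        rw [← List.getD_eq_getElem a 0 hplen] at this
        exact ⟨⟨Nat.zero_le _, hpi⟩, by omega⟩
    unfold pairsAt
    rw [hfilter, Nat.card_Ico]
    omega

lemma sum_range_pairs (a : List Int) (m : Nat) (hm : 1 ≤ m) :
    ∑ i ∈ Finset.range m, pairsAt a 0 i = winPairs a 0 (m - 1) := by
  have hins : Finset.range m = insert 0 (Finset.Ioc 0 (m - 1)) := by
    ext x
    simp only [Finset.mem_range, Finset.mem_insert, Finset.mem_Ioc]
    omega
  have h0 : pairsAt a 0 0 = 0 := by unfold pairsAt; simp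
  rw [hins, Finset.sum_insert (by simp), h0, Nat.zero_add]
  rfl

-- ===== VERDICT (by name: the statement is the Claim_ definition above) =====
theorem findNumOfPair_spec : Claim_equal_findNumOfPair := by
  intro array n _ hpre
  unfold Pre_findNumOfPair at hpre
  unfold Spec_findNumOfPair
  simp only [findNumOfPair, findNumOfPair_alt]
  have ha : (PySem.List.sorted array (fun x => x)).Pairwise (· ≤ ·) :=
    PySem.List.sorted_pairwise array (fun x => x)
  set a := PySem.List.sorted array (fun x => x) with hadef
  have hlen : a.length = array.length := PySem.List.length_sorted array (fun x => x) false
  by_cases hn : n ≤ 0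
  · rw [PySem.List.pyRange_one_eq_nil hn, List.foldl_nil, tpLoop, if_neg (by omega)]
  · have hm1 : 1 ≤ n.toNat := by omega
    have hmlen : n.toNat ≤ a.length := by omega
    have hA : (PySem.List.pyRange 0 n 1).foldl
        (fun count i =>
          if PySem.List.pyGetD a i 0 ≤ 0 then count
          else count + (i - (PySem.List.bisectLeft a (-(PySem.List.pyGetD a i 0) + 1) : Int))) 0
        = ((winPairs a 0 (n.toNat - 1) : Nat) : Int) := by
      rw [PySem.List.pyRange_one 0 n, List.foldl_map]
      refine Eq.trans (PySem.List.foldl_congr_mem' _ _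
        (fun c (k : Nat) => c + (pairsAt a 0 k : Int)) 0 ?_) ?_
      · intro k hk c
        rw [List.mem_range] at hk
        have hklen : k < a.length := by omega
        have hstep := a_step a ha k hklen
        simp only [zero_add, PySem.List.pyGetD_natCast]
        split_ifs at hstep ⊢ with h
        · omega
        · omega
      · rw [PySem.List.foldl_add]
        have hsum : ((List.range ((n - 0).toNat)).map (fun k => (pairsAt a 0 k : Int))).sum
            = ∑ i ∈ Finset.range ((n - 0).toNat), (pairsAt a 0 i : Int) := rfl
        rw [hsum, show ((n : Int) - 0).toNat = n.toNat by omega, ← Nat.cast_sum,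
            sum_range_pairs a n.toNat hm1, zero_add]
    rw [hA, show (n - 1 : Int) = ((n.toNat - 1 : Nat) : Int) by omega,
        show (0 : Int) = ((0 : Nat) : Int) from rfl,
        tpLoop_eq a ha (n.toNat - 1 - 0) 0 (n.toNat - 1) rfl (by omega) (((0:Nat):Int))]
    omega
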